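-- pv_equiv track=rewrite | github.com/Dejniel/Printer-EMX-040256-drivers | print_emx_040256.py | encode_run
-- ===== SOURCE A (Python) =====
-- from typing import List, Tuple
--
-- def encode_run(color: int, count: int) -> List[int]:
--     out = []
--     while count > 127:
--         out.append((color << 7) | 127)
--         count -= 127
--     if count > 0:
--         out.append((color << 7) | count)
--     return out
-- ===== SOURCE B (Python) =====
-- from typing import List
--
-- def encode_run(color: int, count: int) -> List[int]:
--     if count <= 0:
--         return []
--     full, rem = divmod(count, 127)
--     out = [(color << 7) | 127] * full
--     if rem != 0:
--         out.append((color << 7) | rem)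
--     return out
-- ===== Notes on version B (the rewrite author's own statement) =====
-- stated objective: alternative
-- what changed: Replaces the decrementing while-loop with a single divmod: the number of full 127-chunks and the remainder are computed arithmetically and the output is built by list replication plus one optional tail element.
import Mathlib
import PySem

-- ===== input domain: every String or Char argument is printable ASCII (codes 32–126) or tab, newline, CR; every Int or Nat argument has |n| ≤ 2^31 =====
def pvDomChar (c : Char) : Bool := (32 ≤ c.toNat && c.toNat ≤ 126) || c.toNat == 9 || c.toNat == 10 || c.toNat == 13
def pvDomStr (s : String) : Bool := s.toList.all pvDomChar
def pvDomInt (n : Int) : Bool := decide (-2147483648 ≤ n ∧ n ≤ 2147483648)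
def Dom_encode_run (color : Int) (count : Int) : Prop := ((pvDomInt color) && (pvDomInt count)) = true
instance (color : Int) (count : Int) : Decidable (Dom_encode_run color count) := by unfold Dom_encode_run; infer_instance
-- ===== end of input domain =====

-- B replaces A's decrementing while-loop by one divmod: chunk count and remainder
-- are computed arithmetically and the output is built by replication (alternative decomposition).


-- ===== PORT A =====
-- while count > 127: append (color<<7)|127; count -= 127; then if count > 0 append (color<<7)|count
def encode_run (color : Int) (count : Int) : List Int :=
  if 127 < count then
    PySem.Int.bor (color <<< (7:Nat)) 127 :: encode_run color (count - 127)
  else if 0 < count then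
    [PySem.Int.bor (color <<< (7:Nat)) count]
  else []
termination_by count.toNat
decreasing_by omega

-- ===== PORT B =====
-- full, rem = divmod(count, 127); out = [(color<<7)|127]*full; optional tail (color<<7)|rem
def encode_run_alt (color : Int) (count : Int) : List Int :=
  if count ≤ 0 then []
  else
    let full := PySem.Int.floordiv count 127
    let rem := PySem.Int.mod count 127
    let out := List.replicate full.toNat (PySem.Int.bor (color <<< (7:Nat)) 127)
    if rem ≠ 0 then out ++ [PySem.Int.bor (color <<< (7:Nat)) rem] else out

-- ===== PRECONDITION & SPEC =====
def Spec_encode_run (color : Int) (count : Int) (out : List Int) : Prop := out = encode_run_alt color count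
instance (color : Int) (count : Int) (out : List Int) : Decidable (Spec_encode_run color count out) := by unfold Spec_encode_run; infer_instance

-- ===== CLAIM (what is proved, stated in full; the proofs are below) =====
def Claim_equal_encode_run : Prop := ∀ (color : Int) (count : Int), Dom_encode_run color count → Spec_encode_run color count (encode_run color count)

-- ===== LEMMAS AND PROOFS =====

theorem hfd (a : Int) : a.fdiv 127 = a / 127 := by
  simp [Int.fdiv_eq_ediv]

theorem hfm (a : Int) : a.fmod 127 = a % 127 := by
  simp [Int.fmod_eq_emod]

theorem alt_step (color count : Int) (h : 127 < count) :
    encode_run_alt color count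
      = PySem.Int.bor (color <<< (7:Nat)) 127 :: encode_run_alt color (count - 127) := by
  have h127 : (0:Int) ≤ 127 := by norm_num
  unfold encode_run_alt
  simp only [PySem.Int.floordiv, PySem.Int.mod]
  rw [hfd, hfd, hfm, hfm]
  have hd : count / 127 = (count - 127) / 127 + 1 := by omega
  have hm : count % 127 = (count - 127) % 127 := by omega
  have hpos : ¬ count ≤ 0 := by omega
  have hpos' : ¬ count - 127 ≤ 0 := by omega
  have hnn : 0 ≤ (count - 127) / 127 := by
    apply Int.ediv_nonneg <;> omega
  simp only [hpos, hpos', if_false, hd, hm]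
  have ht : ((count - 127) / 127 + 1).toNat = ((count - 127) / 127).toNat + 1 := by omega
  rw [ht, List.replicate_succ]
  split_ifs <;> rfl

theorem key (color count : Int) : encode_run color count = encode_run_alt color count := by
  rw [encode_run]
  split_ifs with h1 h2
  · rw [key color (count - 127), ← alt_step color count h1]
  · -- 0 < count ≤ 127
    have h127 : (0:Int) ≤ 127 := by norm_num
    unfold encode_run_alt
    simp only [PySem.Int.floordiv, PySem.Int.mod]
    rw [hfd, hfm]
    have hpos : ¬ count ≤ 0 := by omega
    rcases eq_or_lt_of_le (by omega : count ≤ 127) with he | hlt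
    · have hd : count / 127 = 1 := by omega
      have hm : count % 127 = 0 := by omega
      simp [he]
    · have hd : count / 127 = 0 := by omega
      have hm : count % 127 = count := by omega
      have hm0 : count % 127 ≠ 0 := by omega
      simp [hpos, hd, hm, show count ≠ 0 by omega]
  · simp [encode_run_alt, show count ≤ 0 by omega]
termination_by count.toNat
decreasing_by omega

-- ===== VERDICT (by name: the statement is the Claim_ definition above) =====
theorem encode_run_spec : Claim_equal_encode_run := by
  intro color count _
  exact key color count
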